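-- pv_equiv track=rewrite | github.com/3seoksw/dynaformer | src/preprocess/preprocess_RWTH.py | find_cycle_ends
-- ===== SOURCE A (Python) =====
-- def find_cycle_ends(current):
--     cycle_end_indices = []
--
--     start = 0
--     end = 0
--     for i in range(1, len(current)):
--         prev = current[i - 1]
--         curr = current[i]
--
--         if prev == 0 and curr < 0:
--             start = i
--         if prev < 0 and curr == 0:
--             end = i
--             cycle_end_indices.append((start, end))
--
--     return cycle_end_indices
-- ===== SOURCE B (Python) =====
-- def find_cycle_ends(current):
--     n = len(current)
--     starts = [i for i in range(1, n) if current[i - 1] == 0 and current[i] < 0]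
--     ends = [i for i in range(1, n) if current[i - 1] < 0 and current[i] == 0]
--     out = []
--     last_start = 0
--     j = 0
--     for e in ends:
--         while j < len(starts) and starts[j] < e:
--             last_start = starts[j]
--             j += 1
--         out.append((last_start, e))
--     return out
-- ===== Notes on version B (the rewrite author's own statement) =====
-- stated objective: alternative
-- what changed: Replaces A's single fused stateful scan (carrying start/end across one loop) by two event-index filter passes (start transitions 0->negative, end transitions negative->0) followed by a pointer-based pairing pass over the end indices.
import Mathlib
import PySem

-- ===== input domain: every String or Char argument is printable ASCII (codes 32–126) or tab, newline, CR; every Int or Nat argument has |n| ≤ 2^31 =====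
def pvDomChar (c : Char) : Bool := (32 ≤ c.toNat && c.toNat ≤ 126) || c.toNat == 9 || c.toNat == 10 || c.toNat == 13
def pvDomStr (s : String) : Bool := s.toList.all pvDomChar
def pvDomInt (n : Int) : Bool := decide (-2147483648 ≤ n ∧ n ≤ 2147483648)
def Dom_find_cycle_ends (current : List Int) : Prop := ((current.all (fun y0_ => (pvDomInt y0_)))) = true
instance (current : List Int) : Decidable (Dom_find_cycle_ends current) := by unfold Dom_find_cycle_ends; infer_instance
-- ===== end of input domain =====

-- B replaces A's single fused stateful scan by two event-index passes plus a pointer-based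
-- pairing pass (objective: alternative decomposition, same cost).

-- ===== PORT A =====
-- loop body of A's for-loop (state: (start, end, cycle_end_indices))
def fceStepA (current : List Int) (st : Int × Int × List (Int × Int)) (i : Int) :
    Int × Int × List (Int × Int) :=
  let prev := PySem.List.pyGetD current (i - 1) 0
  let curr := PySem.List.pyGetD current i 0
  let start := if prev = 0 ∧ curr < 0 then i else st.1
  let endv := if prev < 0 ∧ curr = 0 then i else st.2.1
  let acc := if prev < 0 ∧ curr = 0 then st.2.2 ++ [(start, endv)] else st.2.2
  (start, endv, acc)

def find_cycle_ends (current : List Int) : List (Int × Int) :=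
  ((PySem.List.pyRange 1 (current.length : Int) 1).foldl (fceStepA current)
    (0, 0, [])).2.2

-- ===== PORT B =====
-- the inner while-loop: advance over 'starts' while starts[j] < e, tracking last_start
def fceAdvance (starts : List Int) (e last : Int) : Int × List Int :=
  match starts with
  | [] => (last, [])
  | s :: ss => if s < e then fceAdvance ss e s else (last, s :: ss)

-- the for-loop over 'ends' (the pointer j is represented by the remaining suffix of starts)
def fcePair (ends : List Int) (last : Int) (starts : List Int) : List (Int × Int) :=
  match ends with
  | [] => []
  | e :: es =>
    let p := fceAdvance starts e last
    (p.1, e) :: fcePair es p.1 p.2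

def find_cycle_ends_alt (current : List Int) : List (Int × Int) :=
  let n : Int := current.length
  let starts := (PySem.List.pyRange 1 n 1).filter (fun i =>
    decide (PySem.List.pyGetD current (i - 1) 0 = 0 ∧ PySem.List.pyGetD current i 0 < 0))
  let ends := (PySem.List.pyRange 1 n 1).filter (fun i =>
    decide (PySem.List.pyGetD current (i - 1) 0 < 0 ∧ PySem.List.pyGetD current i 0 = 0))
  fcePair ends 0 starts

-- ===== PRECONDITION & SPEC =====
def Spec_find_cycle_ends (current : List Int) (out : List (Int × Int)) : Prop := out = find_cycle_ends_alt current
instance (current : List Int) (out : List (Int × Int)) : Decidable (Spec_find_cycle_ends current out) := by unfold Spec_find_cycle_ends; infer_instance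

-- ===== CLAIM (what is proved, stated in full; the proofs are below) =====
def Claim_equal_find_cycle_ends : Prop := ∀ (current : List Int), Dom_find_cycle_ends current → Spec_find_cycle_ends current (find_cycle_ends current)

-- ===== LEMMAS AND PROOFS =====

-- if every remaining start is ≥ e, the while-loop does nothing
lemma fceAdvance_of_ge (starts : List Int) (e last : Int)
    (h : ∀ s ∈ starts, ¬ s < e) : fceAdvance starts e last = (last, starts) := by
  cases starts with
  | nil => rfl
  | cons s ss =>
    simp only [fceAdvance, if_neg (h s (by simp))]

-- a start x smaller than every end is absorbed into last_start
lemma fcePair_cons_start (ends : List Int) (last x : Int) (starts : List Int)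
    (h : ∀ e ∈ ends, x < e) :
    fcePair ends last (x :: starts) = fcePair ends x starts := by
  cases ends with
  | nil => rfl
  | cons e es =>
    simp only [fcePair, fceAdvance, if_pos (h e (by simp))]

-- main invariant: A's fold over a strictly increasing index list produces exactly
-- B's pairing of the filtered start/end event indices
lemma fold_eq_pair (current : List Int) :
    ∀ (idxs : List Int), idxs.Pairwise (· < ·) →
    ∀ (last endv : Int) (acc : List (Int × Int)),
    (idxs.foldl (fceStepA current) (last, endv, acc)).2.2
      = acc ++ fcePair
          (idxs.filter (fun i => decide (PySem.List.pyGetD current (i - 1) 0 < 0 ∧ PySem.List.pyGetD current i 0 = 0)))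
          last
          (idxs.filter (fun i => decide (PySem.List.pyGetD current (i - 1) 0 = 0 ∧ PySem.List.pyGetD current i 0 < 0))) := by
  intro idxs
  induction idxs with
  | nil => intro _ last endv acc; simp [fcePair]
  | cons x xs ih =>
    intro hp last endv acc
    rw [List.pairwise_cons] at hp
    obtain ⟨hx, hxs⟩ := hp
    rw [List.foldl_cons]
    by_cases hS : PySem.List.pyGetD current (x - 1) 0 = 0 ∧ PySem.List.pyGetD current x 0 < 0
    · -- start event (cannot also be an end event: prev = 0 contradicts prev < 0)
      have hE : ¬ (PySem.List.pyGetD current (x - 1) 0 < 0 ∧ PySem.List.pyGetD current x 0 = 0) := by omega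
      have e1 : fceStepA current (last, endv, acc) x = (x, endv, acc) := by
        simp only [fceStepA, if_pos hS, if_neg hE]
      rw [e1, ih hxs x endv acc,
        List.filter_cons_of_neg (by simpa using hE),
        List.filter_cons_of_pos (by simpa using hS)]
      congr 1
      exact (fcePair_cons_start _ _ _ _
        (fun e he => hx e (List.mem_of_mem_filter he))).symm
    · by_cases hE : PySem.List.pyGetD current (x - 1) 0 < 0 ∧ PySem.List.pyGetD current x 0 = 0
      · -- end event: appends (last, x); no remaining start index is < x
        have e1 : fceStepA current (last, endv, acc) x = (last, x, acc ++ [(last, x)]) := by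
          simp only [fceStepA, if_pos hE, if_neg hS]
        rw [e1, ih hxs last x (acc ++ [(last, x)]),
          List.filter_cons_of_pos (by simpa using hE),
          List.filter_cons_of_neg (by simpa using hS)]
        have hadv := fceAdvance_of_ge
          (xs.filter (fun i => decide (PySem.List.pyGetD current (i - 1) 0 = 0 ∧ PySem.List.pyGetD current i 0 < 0)))
          x last
          (fun s hs => by have := hx s (List.mem_of_mem_filter hs); omega)
        simp only [fcePair, hadv, List.append_assoc, List.singleton_append]
      · -- neither event: state unchanged
        have e1 : fceStepA current (last, endv, acc) x = (last, endv, acc) := by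
          simp only [fceStepA, if_neg hS, if_neg hE]
        rw [e1, ih hxs last endv acc,
          List.filter_cons_of_neg (by simpa using hE),
          List.filter_cons_of_neg (by simpa using hS)]

-- ===== VERDICT (by name: the statement is the Claim_ definition above) =====
theorem find_cycle_ends_spec : Claim_equal_find_cycle_ends := by
  intro current _
  show find_cycle_ends current = find_cycle_ends_alt current
  unfold find_cycle_ends find_cycle_ends_alt
  rw [fold_eq_pair current _ (PySem.List.pairwise_lt_pyRange_one 1 (current.length : Int))]
  simp
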